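-- pv_equiv track=rewrite | github.com/hammad-a/verilog_repair | prototype/repair.py | extended_fl_for_study
-- ===== SOURCE A (Python) =====
-- def extended_fl_for_study(fl_lines, delta):
--     extended_fl = set()
--     for i in range(max(fl_lines)+delta): # e.g. 0 thru 108
--         if i in fl_lines:
--             extended_fl.add(i)
--         else:
--             for j in range(1, delta+1):
--                 if i+j in fl_lines or i-j in fl_lines:
--                     extended_fl.add(i)
--     return extended_fl
-- ===== SOURCE B (Python) =====
-- def extended_fl_for_study(fl_lines, delta):
--     # Expand each fault line to its clamped +-delta neighborhood, sweeping lines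
--     # in increasing order so each index is emitted once (returned as a set).
--     hi = max(fl_lines) + delta
--     d = max(delta, 0)  # a fault line itself always counts, even when delta <= 0
--     out = []
--     end = 0
--     for f in sorted(set(fl_lines)):
--         start = max(end, f - d, 0)
--         stop = min(hi, f + d + 1)
--         out.extend(range(start, stop))
--         if stop > end:
--             end = stop
--     return set(out)
-- ===== Notes on version B (the rewrite author's own statement) =====
-- stated objective: faster
-- what changed: Instead of scanning every index in range(max+delta) and probing all 2*delta offsets against the fault-line list, B sorts the distinct fault lines once and emits each line's clamped +-delta neighborhood in a single increasing sweep, so work is proportional to the lines and their neighborhoods rather than to the whole index range.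
import Mathlib
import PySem

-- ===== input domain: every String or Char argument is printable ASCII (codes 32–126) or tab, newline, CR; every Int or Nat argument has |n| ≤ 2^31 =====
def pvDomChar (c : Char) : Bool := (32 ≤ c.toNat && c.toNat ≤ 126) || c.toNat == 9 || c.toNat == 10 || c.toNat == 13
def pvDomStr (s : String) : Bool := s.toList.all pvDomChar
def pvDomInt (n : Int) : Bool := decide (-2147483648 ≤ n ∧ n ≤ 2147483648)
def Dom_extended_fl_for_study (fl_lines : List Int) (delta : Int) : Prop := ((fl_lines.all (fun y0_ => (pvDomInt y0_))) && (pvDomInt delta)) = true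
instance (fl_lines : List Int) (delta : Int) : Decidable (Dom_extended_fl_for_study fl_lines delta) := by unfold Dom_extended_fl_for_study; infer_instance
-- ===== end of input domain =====

-- B replaces A's scan of the whole index range [0, max+delta) by expanding each
-- fault line's clamped ±delta neighborhood in one sorted sweep: work proportional
-- to the lines and their neighborhoods instead of to the whole range.
-- Both return a set; the ports both list it in increasing order.

-- ===== PORT A =====
def extended_fl_for_study (fl_lines : List Int) (delta : Int) : List Int :=
  match PySem.List.max? fl_lines (fun x => x) with
  | none => []        -- max() of an empty sequence raises ValueError; excluded by Pre_
  | some m =>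
      (PySem.List.pyRange 0 (m + delta) 1).foldl
        (fun s i =>
          if fl_lines.contains i then PySem.Set.add s i
          else
            (PySem.List.pyRange 1 (delta + 1) 1).foldl
              (fun s2 j =>
                if fl_lines.contains (i + j) || fl_lines.contains (i - j) then
                  PySem.Set.add s2 i
                else s2) s)
        PySem.Set.empty

-- ===== PORT B =====
-- the sweep loop of Source B: state (out, end); start/stop inlined
def pvBLoop (hi d : Int) : List Int → List Int → Int → List Int
  | [], out, _ => out
  | f :: rest, out, e =>
      pvBLoop hi d rest
        (out ++ PySem.List.pyRange (max (max e (f - d)) 0) (min hi (f + d + 1)) 1)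
        (if min hi (f + d + 1) > e then min hi (f + d + 1) else e)

def extended_fl_for_study_alt (fl_lines : List Int) (delta : Int) : List Int :=
  match PySem.List.max? fl_lines (fun x => x) with
  | none => []        -- max() raises; excluded by Pre_
  | some m =>
      PySem.Set.ofList
        (pvBLoop (m + delta) (max delta 0)
          (PySem.List.sorted (PySem.Set.ofList fl_lines) (fun x => x) false) [] 0)

-- ===== PRECONDITION & SPEC =====
-- A (and B) raise ValueError on max() of an empty sequence; nothing else raises.
def Pre_extended_fl_for_study (fl_lines : List Int) (delta : Int) : Prop := fl_lines ≠ []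
instance (fl_lines : List Int) (delta : Int) : Decidable (Pre_extended_fl_for_study fl_lines delta) := by unfold Pre_extended_fl_for_study; infer_instance
def pvWitness_extended_fl_for_study : List Int × Int := ([1, 5], 2)

def Spec_extended_fl_for_study (fl_lines : List Int) (delta : Int) (out : List Int) : Prop := out = extended_fl_for_study_alt fl_lines delta
instance (fl_lines : List Int) (delta : Int) (out : List Int) : Decidable (Spec_extended_fl_for_study fl_lines delta out) := by unfold Spec_extended_fl_for_study; infer_instance

-- ===== CLAIM (what is proved, stated in full; the proofs are below) =====
def Claim_equal_extended_fl_for_study : Prop := ∀ (fl_lines : List Int) (delta : Int), Dom_extended_fl_for_study fl_lines delta → Pre_extended_fl_for_study fl_lines delta → Spec_extended_fl_for_study fl_lines delta (extended_fl_for_study fl_lines delta)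

-- ===== LEMMAS AND PROOFS =====

-- the condition A tests at index i
def pvCondA (fl_lines : List Int) (delta : Int) (i : Int) : Bool :=
  fl_lines.contains i ||
    (PySem.List.pyRange 1 (delta + 1) 1).any
      (fun j => fl_lines.contains (i + j) || fl_lines.contains (i - j))

-- A's inner j-loop adds i (possibly repeatedly) iff some j hits a fault line
theorem pvInnerFold (fl_lines : List Int) (i : Int) (l : List Int) (s : PySem.Set Int) :
    l.foldl
      (fun s2 j =>
        if fl_lines.contains (i + j) || fl_lines.contains (i - j) then
          PySem.Set.add s2 i
        else s2) s
    = if l.any (fun j => fl_lines.contains (i + j) || fl_lines.contains (i - j)) then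
        PySem.Set.add s i
      else s := by
  induction l generalizing s with
  | nil => simp
  | cons j rest ih =>
      rw [List.foldl_cons, List.any_cons]
      by_cases h : (fl_lines.contains (i + j) || fl_lines.contains (i - j)) = true
      · rw [if_pos h, ih, h, Bool.true_or, if_pos rfl]
        split
        · exact PySem.Set.add_of_mem ((PySem.Set.mem_add s i i).mpr (Or.inr rfl))
        · rfl
      · simp only [Bool.not_eq_true] at h
        rw [h, Bool.false_or, if_neg (by simp)]
        exact ih s

-- folding conditional Set.add over a nodup list of fresh elements appends the filter
theorem pvFoldAddFilter (c : Int → Bool) (l : List Int) (s : PySem.Set Int)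
    (hnd : l.Nodup) (hfresh : ∀ x ∈ l, x ∉ s) :
    l.foldl (fun s i => if c i then PySem.Set.add s i else s) s = s ++ l.filter c := by
  induction l generalizing s with
  | nil => simp
  | cons i rest ih =>
      rw [List.foldl_cons, List.filter_cons]
      by_cases h : c i = true
      · rw [if_pos h, if_pos h,
          PySem.Set.add_of_not_mem (hfresh i (List.mem_cons_self ..)),
          ih (s ++ [i]) hnd.of_cons]
        · simp
        · intro x hx
          simp only [List.mem_append, List.mem_singleton]
          rintro (hs | rfl)
          · exact hfresh x (List.mem_cons_of_mem _ hx) hs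
          · exact (List.nodup_cons.mp hnd).1 hx
      · rw [if_neg h, if_neg h, ih s hnd.of_cons
          (fun x hx => hfresh x (List.mem_cons_of_mem _ hx))]

-- A's whole loop is the filter of the scanned range
theorem pvA_eq_filter (fl_lines : List Int) (delta lim : Int) :
    (PySem.List.pyRange 0 lim 1).foldl
      (fun s i =>
        if fl_lines.contains i then PySem.Set.add s i
        else
          (PySem.List.pyRange 1 (delta + 1) 1).foldl
            (fun s2 j =>
              if fl_lines.contains (i + j) || fl_lines.contains (i - j) then
                PySem.Set.add s2 i
              else s2) s)
      PySem.Set.empty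
    = (PySem.List.pyRange 0 lim 1).filter (pvCondA fl_lines delta) := by
  rw [PySem.List.foldl_congr_mem _ _
    (fun s i => if pvCondA fl_lines delta i then PySem.Set.add s i else s) _ ?_]
  · simpa [PySem.Set.empty] using pvFoldAddFilter (pvCondA fl_lines delta) _ PySem.Set.empty
      (PySem.List.nodup_pyRange_one 0 lim) (by intro x _ hx; simp [PySem.Set.empty] at hx)
  · intro s i _
    show (if fl_lines.contains i then PySem.Set.add s i
          else (PySem.List.pyRange 1 (delta + 1) 1).foldl
            (fun s2 j =>
              if fl_lines.contains (i + j) || fl_lines.contains (i - j) then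
                PySem.Set.add s2 i
              else s2) s)
        = if pvCondA fl_lines delta i then PySem.Set.add s i else s
    rw [pvInnerFold]
    unfold pvCondA
    cases hc : fl_lines.contains i with
    | true => simp
    | false => rw [Bool.false_or]; exact if_neg (by decide)

-- the coverage predicate: within max(delta,0) of some fault line
def pvCov (fl_lines : List Int) (d x : Int) : Prop :=
  ∃ f ∈ fl_lines, f - d ≤ x ∧ x ≤ f + d

theorem pvCondA_iff (fl_lines : List Int) (delta i : Int) :
    pvCondA fl_lines delta i = true ↔ pvCov fl_lines (max delta 0) i := by
  unfold pvCondA pvCov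
  simp only [Bool.or_eq_true, List.any_eq_true, List.contains_eq_mem, decide_eq_true_eq,
    PySem.List.mem_pyRange_one]
  constructor
  · rintro (h | ⟨j, ⟨h1, h2⟩, (h3 | h3)⟩)
    · exact ⟨i, h, by omega, by omega⟩
    · exact ⟨i + j, h3, by omega, by omega⟩
    · exact ⟨i - j, h3, by omega, by omega⟩
  · rintro ⟨f, hf, h1, h2⟩
    by_cases hfi : f = i
    · exact Or.inl (hfi ▸ hf)
    · right
      by_cases hlt : i < f
      · exact ⟨f - i, ⟨by omega, by omega⟩,
          Or.inl (by simpa [show i + (f - i) = f by ring] using hf)⟩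
      · exact ⟨i - f, ⟨by omega, by omega⟩,
          Or.inr (by simpa [show i - (i - f) = f by ring] using hf)⟩

-- the sweep loop keeps the output strictly increasing and emits exactly the
-- not-yet-emitted covered indices below hi
theorem pvBLoop_spec (hi d : Int) (fs : List Int) :
    ∀ out e, fs.Pairwise (· < ·) → out.Pairwise (· < ·) → (∀ x ∈ out, x < e) →
      (∀ x, 0 ≤ x → x < e → (∃ f ∈ fs, f - d ≤ x) → x ∈ out) →
      (pvBLoop hi d fs out e).Pairwise (· < ·) ∧
      (∀ x, x ∈ pvBLoop hi d fs out e ↔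
        x ∈ out ∨ (0 ≤ x ∧ x < hi ∧ ∃ f ∈ fs, f - d ≤ x ∧ x ≤ f + d)) := by
  induction fs with
  | nil =>
      intro out e _ hout _ _
      refine ⟨hout, fun x => ?_⟩
      simp [pvBLoop]
  | cons f rest ih =>
      intro out e hfs hout hlt hskip
      have hflt : ∀ g ∈ rest, f < g := fun g hg => (List.pairwise_cons.mp hfs).1 g hg
      simp only [pvBLoop]
      rw [show (if min hi (f + d + 1) > e then min hi (f + d + 1) else e)
            = max e (min hi (f + d + 1)) from by split <;> omega]
      have hout' : (out ++ PySem.List.pyRange (max (max e (f - d)) 0) (min hi (f + d + 1)) 1).Pairwise (· < ·) := by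
        refine List.pairwise_append.mpr
          ⟨hout, PySem.List.pairwise_lt_pyRange_one _ _, ?_⟩
        intro x hx y hy
        have hy' := PySem.List.mem_pyRange_one.mp hy
        have hx' := hlt x hx
        omega
      have hlt' : ∀ x ∈ out ++ PySem.List.pyRange (max (max e (f - d)) 0) (min hi (f + d + 1)) 1,
          x < max e (min hi (f + d + 1)) := by
        intro x hx
        rcases List.mem_append.mp hx with hx | hx
        · have := hlt x hx; omega
        · have := PySem.List.mem_pyRange_one.mp hx; omega
      have hskip' : ∀ x, 0 ≤ x → x < max e (min hi (f + d + 1)) →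
          (∃ g ∈ rest, g - d ≤ x) →
          x ∈ out ++ PySem.List.pyRange (max (max e (f - d)) 0) (min hi (f + d + 1)) 1 := by
        rintro x hx0 hxe ⟨g, hg, hgx⟩
        by_cases hxe0 : x < e
        · exact List.mem_append_left _
            (hskip x hx0 hxe0 ⟨g, List.mem_cons_of_mem _ hg, hgx⟩)
        · refine List.mem_append_right _ (PySem.List.mem_pyRange_one.mpr ?_)
          have hfg := hflt g hg
          constructor <;> omega
      obtain ⟨hP, hM⟩ := ih _ _ hfs.of_cons hout' hlt' hskip'
      refine ⟨hP, fun x => ?_⟩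
      rw [hM x]
      simp only [List.mem_append, PySem.List.mem_pyRange_one, List.mem_cons]
      constructor
      · rintro ((hx | hx) | ⟨hx0, hxhi, g, hg, h1, h2⟩)
        · exact Or.inl hx
        · exact Or.inr ⟨by omega, by omega, f, Or.inl rfl, by omega, by omega⟩
        · exact Or.inr ⟨hx0, hxhi, g, Or.inr hg, h1, h2⟩
      · rintro (hx | ⟨hx0, hxhi, g, hg, h1, h2⟩)
        · exact Or.inl (Or.inl hx)
        · rcases hg with rfl | hg
          · by_cases hxe : x < e
            · exact Or.inl (Or.inl (hskip x hx0 hxe ⟨g, List.mem_cons_self .., h1⟩))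
            · exact Or.inl (Or.inr (by constructor <;> omega))
          · exact Or.inr ⟨hx0, hxhi, g, hg, h1, h2⟩

-- two strictly increasing integer lists with the same members are equal
theorem pvChainEq (l₁ l₂ : List Int) (h₁ : l₁.Pairwise (· < ·)) (h₂ : l₂.Pairwise (· < ·))
    (hm : ∀ x, x ∈ l₁ ↔ x ∈ l₂) : l₁ = l₂ :=
  List.Perm.eq_of_pairwise (fun a b _ _ hab hba => by omega) h₁ h₂
    ((List.perm_ext_iff_of_nodup (h₁.imp ne_of_lt) (h₂.imp ne_of_lt)).mpr hm)

-- ===== VERDICT (by name: the statement is the Claim_ definition above) =====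
theorem extended_fl_for_study_spec : Claim_equal_extended_fl_for_study := by
  intro fl_lines delta _ hpre
  unfold Spec_extended_fl_for_study extended_fl_for_study extended_fl_for_study_alt
  obtain ⟨m, hm⟩ : ∃ m, PySem.List.max? fl_lines (fun x => x) = some m := by
    cases h : PySem.List.max? fl_lines (fun x => x) with
    | none => exact absurd ((PySem.List.max?_eq_none_iff fl_lines _).mp h) hpre
    | some m => exact ⟨m, rfl⟩
  simp only [hm]
  rw [pvA_eq_filter]
  have hfsp := PySem.List.sorted_ofList_pairwise_lt fl_lines
  have hfsm : ∀ x, x ∈ PySem.List.sorted (PySem.Set.ofList fl_lines) (fun x => x) false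
      ↔ x ∈ fl_lines := by
    intro x
    rw [(PySem.List.sorted_perm (PySem.Set.ofList fl_lines) (fun x => x) false).mem_iff,
      PySem.Set.mem_ofList]
  obtain ⟨hBP, hBM⟩ := pvBLoop_spec (m + delta) (max delta 0)
    (PySem.List.sorted (PySem.Set.ofList fl_lines) (fun x => x) false) [] 0
    hfsp List.Pairwise.nil (by simp)
    (fun x hx0 hx _ => absurd hx (by omega))
  rw [PySem.Set.ofList_eq_self_of_nodup _ (hBP.imp ne_of_lt)]
  refine pvChainEq _ _ ((PySem.List.pairwise_lt_pyRange_one 0 (m + delta)).filter _) hBP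
    (fun x => ?_)
  rw [hBM x, List.mem_filter, PySem.List.mem_pyRange_one, pvCondA_iff]
  unfold pvCov
  constructor
  · rintro ⟨⟨h0, hhi⟩, f, hf, h1, h2⟩
    exact Or.inr ⟨h0, hhi, f, (hfsm f).mpr hf, h1, h2⟩
  · rintro (hx | ⟨h0, hhi, f, hf, h1, h2⟩)
    · exact absurd hx (by simp)
    · exact ⟨⟨h0, hhi⟩, f, (hfsm f).mp hf, h1, h2⟩
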